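-- pv_equiv track=rewrite | github.com/sdh-dot/aru_archive | app/views/workflow_wizard_view.py | _visible_step_number
-- ===== SOURCE A (Python) =====
-- from typing import Optional
--
-- _STEPS = [
--     (1, "작업 폴더",      "작업 폴더 설정"),
--     (2, "이미지 스캔",    "이미지 스캔"),
--     (3, "메타데이터 확인", "메타데이터 확인"),
--     (4, "메타데이터 보강", "메타데이터 보강"),
--     (5, "분류 기준 선택", "분류 기준 선택"),
--     (6, "태그 재분류",    "태그 재분류 (자동)"),
--     (7, "분류 미리보기",  "분류 미리보기"),
--     (8, "분류 실행",      "분류 실행"),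
--     (9, "결과 / 되돌리기", "결과 / 되돌리기"),
-- ]
--
-- _HIDDEN_STEP_INDICES = {5}
--
-- def _visible_step_number(internal_idx: int) -> Optional[int]:
--     """internal stack index → 1-based 사용자 표시 번호. hidden 이면 None.
--
--     사용자에게 hidden step 이 끼어 있는 게 안 보이도록 visible step 만 1..N
--     번호를 매긴다. 예: hidden index 5 → visible 6 = internal 6.
--     """
--     if internal_idx < 0 or internal_idx >= len(_STEPS):
--         return None
--     if internal_idx in _HIDDEN_STEP_INDICES:
--         return None
--     visible = 0
--     for i in range(internal_idx + 1):
--         if i in _HIDDEN_STEP_INDICES: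
--             continue
--         visible += 1
--     return visible
-- ===== SOURCE B (Python) =====
-- from typing import Optional
--
-- _STEPS = [
--     (1, "작업 폴더",      "작업 폴더 설정"),
--     (2, "이미지 스캔",    "이미지 스캔"),
--     (3, "메타데이터 확인", "메타데이터 확인"),
--     (4, "메타데이터 보강", "메타데이터 보강"),
--     (5, "분류 기준 선택", "분류 기준 선택"),
--     (6, "태그 재분류",    "태그 재분류 (자동)"),
--     (7, "분류 미리보기",  "분류 미리보기"),
--     (8, "분류 실행",      "분류 실행"),
--     (9, "결과 / 되돌리기", "결과 / 되돌리기"),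
-- ]
--
-- _HIDDEN_STEP_INDICES = {5}
--
-- def _visible_step_number(internal_idx: int) -> Optional[int]:
--     if internal_idx < 0 or internal_idx >= len(_STEPS):
--         return None
--     if internal_idx in _HIDDEN_STEP_INDICES:
--         return None
--     return internal_idx + 1 - sum(1 for h in _HIDDEN_STEP_INDICES if h <= internal_idx)
-- ===== Notes on version B (the rewrite author's own statement) =====
-- stated objective: simpler
-- what changed: Replaced the prefix scan over the whole step range with a closed-form offset: the successor of the index minus the count of hidden indices at or below it.
import Mathlib
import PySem

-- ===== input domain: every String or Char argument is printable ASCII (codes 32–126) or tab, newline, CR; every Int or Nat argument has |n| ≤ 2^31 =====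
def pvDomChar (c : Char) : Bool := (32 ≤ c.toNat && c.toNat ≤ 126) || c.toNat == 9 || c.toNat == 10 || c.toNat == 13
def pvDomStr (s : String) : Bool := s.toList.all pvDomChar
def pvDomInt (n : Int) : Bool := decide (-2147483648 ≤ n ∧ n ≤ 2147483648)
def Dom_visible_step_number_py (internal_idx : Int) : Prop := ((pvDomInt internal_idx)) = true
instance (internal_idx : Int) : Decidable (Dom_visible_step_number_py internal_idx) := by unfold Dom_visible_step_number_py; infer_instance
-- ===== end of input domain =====

-- B replaces A's prefix scan with a closed-form offset (successor of the index minus the hidden indices at or below it): simpler.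


-- ===== PORT A =====
-- _HIDDEN_STEP_INDICES = {5}; len(_STEPS) = 9
def pvHiddenA : PySem.Set Int := PySem.Set.ofList [5]

def visible_step_number_py (internal_idx : Int) : Option Int :=
  if internal_idx < 0 ∨ internal_idx ≥ 9 then none
  else if pvHiddenA.contains internal_idx then none
  else
    some ((PySem.List.pyRange 0 (internal_idx + 1) 1).foldl
      (fun visible i => if pvHiddenA.contains i then visible else visible + 1) 0)

-- ===== PORT B =====
def visible_step_number_py_alt (internal_idx : Int) : Option Int :=
  if internal_idx < 0 ∨ internal_idx ≥ 9 then none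
  else if (PySem.Set.ofList [5] : PySem.Set Int).contains internal_idx then none
  else
    some (internal_idx + 1 -
      (((PySem.Set.ofList [5] : PySem.Set Int).filter (fun h => h ≤ internal_idx)).length : Int))

-- ===== PRECONDITION & SPEC =====
def Spec_visible_step_number_py (internal_idx : Int) (out : Option Int) : Prop := out = visible_step_number_py_alt internal_idx
instance (internal_idx : Int) (out : Option Int) : Decidable (Spec_visible_step_number_py internal_idx out) := by unfold Spec_visible_step_number_py; infer_instance

-- ===== CLAIM (what is proved, stated in full; the proofs are below) =====
def Claim_equal_visible_step_number_py : Prop := ∀ (internal_idx : Int), Dom_visible_step_number_py internal_idx → Spec_visible_step_number_py internal_idx (visible_step_number_py internal_idx)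

-- ===== LEMMAS AND PROOFS =====

-- ===== VERDICT (by name: the statement is the Claim_ definition above) =====
theorem visible_step_number_py_spec : Claim_equal_visible_step_number_py := by
  intro n _
  unfold Spec_visible_step_number_py visible_step_number_py visible_step_number_py_alt
  rcases lt_or_ge n 0 with h0 | h0
  · simp [if_pos (Or.inl h0)]
  · rcases lt_or_ge n 9 with h9 | h9
    · have : ¬ (n < 0 ∨ n ≥ 9) := by omega
      interval_cases n <;> decide
    · simp [if_pos (Or.inr h9)]
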